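-- pv_equiv track=rewrite | github.com/pranamyajainn/HireAI | utils/ai_matcher.py | _skills_similar
-- ===== SOURCE A (Python) =====
-- def _skills_similar(skill1: str, skill2: str) -> bool:
--     """Check if two skills are similar"""
--     similar_skills = {
--         'javascript': ['js', 'node', 'react', 'angular'],
--         'python': ['django', 'flask', 'fastapi'],
--         'machine learning': ['ml', 'ai', 'tensorflow', 'pytorch'],
--         'database': ['sql', 'mysql', 'postgresql', 'mongodb']
--     }
--
--     for base_skill, variants in similar_skills.items():
--         if (skill1 in variants and base_skill in skill2) or (skill2 in variants and base_skill in skill1):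
--             return True
--
--     return False
-- ===== SOURCE B (Python) =====
-- # Bit-set formulation: each skill is classified once into a category bit, and each skill yields a
-- # bitmask of the base names it contains; similarity is a nonempty bitmask intersection.
-- _CATEGORY_BIT = {
--     'js': 1, 'node': 1, 'react': 1, 'angular': 1,
--     'django': 2, 'flask': 2, 'fastapi': 2,
--     'ml': 4, 'ai': 4, 'tensorflow': 4, 'pytorch': 4,
--     'sql': 8, 'mysql': 8, 'postgresql': 8, 'mongodb': 8,
-- }
--
-- _BASE_BITS = [('javascript', 1), ('python', 2), ('machine learning', 4), ('database', 8)]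
--
--
-- def _contained_bases_mask(skill: str) -> int:
--     m = 0
--     for base, bit in _BASE_BITS:
--         if base in skill:
--             m |= bit
--     return m
--
--
-- def _skills_similar(skill1: str, skill2: str) -> bool:
--     """Check if two skills are similar"""
--     return bool(_CATEGORY_BIT.get(skill1, 0) & _contained_bases_mask(skill2)
--                 or _CATEGORY_BIT.get(skill2, 0) & _contained_bases_mask(skill1))
-- ===== Notes on version B (the rewrite author's own statement) =====
-- stated objective: alternative
-- what changed: Replaced A's scan over (base, variants) entries pairing list-membership with a substring test by a bit-set formulation: each skill is classified once into a category bit via a dict, each skill yields a bitmask of base names it contains, and the answer is a nonempty bitmask intersection (symmetrically).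
import Mathlib
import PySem

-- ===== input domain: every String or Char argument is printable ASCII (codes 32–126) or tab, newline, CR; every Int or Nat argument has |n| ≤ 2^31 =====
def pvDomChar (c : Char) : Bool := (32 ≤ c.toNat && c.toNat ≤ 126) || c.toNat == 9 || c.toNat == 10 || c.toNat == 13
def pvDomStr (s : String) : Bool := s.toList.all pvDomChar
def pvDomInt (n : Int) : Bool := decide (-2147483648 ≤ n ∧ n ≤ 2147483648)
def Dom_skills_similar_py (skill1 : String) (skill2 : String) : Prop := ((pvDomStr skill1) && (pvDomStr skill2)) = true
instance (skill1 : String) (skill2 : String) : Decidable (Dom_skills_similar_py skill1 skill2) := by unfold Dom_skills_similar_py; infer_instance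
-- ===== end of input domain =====

-- B replaces A's scan over (base, variants) entries by a bit-set formulation: category bit for each
-- skill, bitmask of contained bases for the other, answer = nonempty bitmask intersection.

-- ===== PORT A =====
-- the dict literal 'similar_skills'
def pvSimilarSkills : PySem.Dict String (List String) :=
  PySem.Dict.ofList
    [("javascript", ["js", "node", "react", "angular"]),
     ("python", ["django", "flask", "fastapi"]),
     ("machine learning", ["ml", "ai", "tensorflow", "pytorch"]),
     ("database", ["sql", "mysql", "postgresql", "mongodb"])]

-- 'for base_skill, variants in similar_skills.items(): if …: return True' / 'return False'
def pvSimilarLoop (items : List (String × List String)) (skill1 skill2 : String) : Bool :=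
  match items with
  | [] => false
  | (base_skill, variants) :: rest =>
    if (variants.contains skill1 && PySem.Str.isIn base_skill skill2) ||
       (variants.contains skill2 && PySem.Str.isIn base_skill skill1) then
      true
    else
      pvSimilarLoop rest skill1 skill2

def skills_similar_py (skill1 : String) (skill2 : String) : Bool :=
  pvSimilarLoop (PySem.Dict.items pvSimilarSkills) skill1 skill2

-- ===== PORT B =====
-- the dict literal '_CATEGORY_BIT'
def pvCategoryBit : PySem.Dict String Int :=
  PySem.Dict.ofList
    [("js", 1), ("node", 1), ("react", 1), ("angular", 1),
     ("django", 2), ("flask", 2), ("fastapi", 2),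
     ("ml", 4), ("ai", 4), ("tensorflow", 4), ("pytorch", 4),
     ("sql", 8), ("mysql", 8), ("postgresql", 8), ("mongodb", 8)]

-- the list literal '_BASE_BITS'
def pvBaseBits : List (String × Int) :=
  [("javascript", 1), ("python", 2), ("machine learning", 4), ("database", 8)]

-- '_contained_bases_mask': 'for base, bit in _BASE_BITS: if base in skill: m |= bit'
def pvMaskLoop (bases : List (String × Int)) (skill : String) (m : Int) : Int :=
  match bases with
  | [] => m
  | (base, bit) :: rest =>
    pvMaskLoop rest skill (if PySem.Str.isIn base skill then Int.lor m bit else m)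

def pvContainedBasesMask (skill : String) : Int := pvMaskLoop pvBaseBits skill 0

-- 'bool(x or y)' on ints = (x ≠ 0) || (y ≠ 0)
def skills_similar_py_alt (skill1 : String) (skill2 : String) : Bool :=
  decide (Int.land (PySem.Dict.getD pvCategoryBit skill1 0) (pvContainedBasesMask skill2) ≠ 0) ||
  decide (Int.land (PySem.Dict.getD pvCategoryBit skill2 0) (pvContainedBasesMask skill1) ≠ 0)

-- ===== PRECONDITION & SPEC =====
def Spec_skills_similar_py (skill1 : String) (skill2 : String) (out : Bool) : Prop := out = skills_similar_py_alt skill1 skill2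
instance (skill1 : String) (skill2 : String) (out : Bool) : Decidable (Spec_skills_similar_py skill1 skill2 out) := by unfold Spec_skills_similar_py; infer_instance

-- ===== CLAIM (what is proved, stated in full; the proofs are below) =====
def Claim_equal_skills_similar_py : Prop := ∀ (skill1 : String) (skill2 : String), Dom_skills_similar_py skill1 skill2 → Spec_skills_similar_py skill1 skill2 (skills_similar_py skill1 skill2)

-- ===== LEMMAS AND PROOFS =====

-- the mask of contained bases, written out over the four fixed entries
theorem pvMask_eq (o : String) :
    pvContainedBasesMask o =
      (Int.lor (Int.lor (Int.lor (Int.lor (0 : Int) (if PySem.Str.isIn "javascript" o then 1 else 0))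
        (if PySem.Str.isIn "python" o then 2 else 0))
        (if PySem.Str.isIn "machine learning" o then 4 else 0))
        (if PySem.Str.isIn "database" o then 8 else 0)) := by
  unfold pvContainedBasesMask pvBaseBits
  simp only [pvMaskLoop]
  split_ifs <;> decide

-- one direction of A's per-entry test, collected over the four entries, equals one B mask test
theorem pvHalf (s o : String) :
    ((["js", "node", "react", "angular"].contains s && PySem.Str.isIn "javascript" o) ||
     (["django", "flask", "fastapi"].contains s && PySem.Str.isIn "python" o) ||
     (["ml", "ai", "tensorflow", "pytorch"].contains s && PySem.Str.isIn "machine learning" o) ||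
     (["sql", "mysql", "postgresql", "mongodb"].contains s && PySem.Str.isIn "database" o)) =
    decide (Int.land (PySem.Dict.getD pvCategoryBit s 0) (pvContainedBasesMask o) ≠ 0) := by
  rw [pvMask_eq o]
  by_cases h0 : s = "js"
  · subst h0
    rw [show PySem.Dict.getD pvCategoryBit "js" (0 : Int) = 1 from rfl]
    generalize PySem.Str.isIn "javascript" o = b0
    generalize PySem.Str.isIn "python" o = b1
    generalize PySem.Str.isIn "machine learning" o = b2
    generalize PySem.Str.isIn "database" o = b3
    revert b0 b1 b2 b3
    decide
  by_cases h1 : s = "node"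
  · subst h1
    rw [show PySem.Dict.getD pvCategoryBit "node" (0 : Int) = 1 from rfl]
    generalize PySem.Str.isIn "javascript" o = b0
    generalize PySem.Str.isIn "python" o = b1
    generalize PySem.Str.isIn "machine learning" o = b2
    generalize PySem.Str.isIn "database" o = b3
    revert b0 b1 b2 b3
    decide
  by_cases h2 : s = "react"
  · subst h2
    rw [show PySem.Dict.getD pvCategoryBit "react" (0 : Int) = 1 from rfl]
    generalize PySem.Str.isIn "javascript" o = b0
    generalize PySem.Str.isIn "python" o = b1
    generalize PySem.Str.isIn "machine learning" o = b2
    generalize PySem.Str.isIn "database" o = b3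
    revert b0 b1 b2 b3
    decide
  by_cases h3 : s = "angular"
  · subst h3
    rw [show PySem.Dict.getD pvCategoryBit "angular" (0 : Int) = 1 from rfl]
    generalize PySem.Str.isIn "javascript" o = b0
    generalize PySem.Str.isIn "python" o = b1
    generalize PySem.Str.isIn "machine learning" o = b2
    generalize PySem.Str.isIn "database" o = b3
    revert b0 b1 b2 b3
    decide
  by_cases h4 : s = "django"
  · subst h4
    rw [show PySem.Dict.getD pvCategoryBit "django" (0 : Int) = 2 from rfl]
    generalize PySem.Str.isIn "javascript" o = b0
    generalize PySem.Str.isIn "python" o = b1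
    generalize PySem.Str.isIn "machine learning" o = b2
    generalize PySem.Str.isIn "database" o = b3
    revert b0 b1 b2 b3
    decide
  by_cases h5 : s = "flask"
  · subst h5
    rw [show PySem.Dict.getD pvCategoryBit "flask" (0 : Int) = 2 from rfl]
    generalize PySem.Str.isIn "javascript" o = b0
    generalize PySem.Str.isIn "python" o = b1
    generalize PySem.Str.isIn "machine learning" o = b2
    generalize PySem.Str.isIn "database" o = b3
    revert b0 b1 b2 b3
    decide
  by_cases h6 : s = "fastapi"
  · subst h6
    rw [show PySem.Dict.getD pvCategoryBit "fastapi" (0 : Int) = 2 from rfl]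
    generalize PySem.Str.isIn "javascript" o = b0
    generalize PySem.Str.isIn "python" o = b1
    generalize PySem.Str.isIn "machine learning" o = b2
    generalize PySem.Str.isIn "database" o = b3
    revert b0 b1 b2 b3
    decide
  by_cases h7 : s = "ml"
  · subst h7
    rw [show PySem.Dict.getD pvCategoryBit "ml" (0 : Int) = 4 from rfl]
    generalize PySem.Str.isIn "javascript" o = b0
    generalize PySem.Str.isIn "python" o = b1
    generalize PySem.Str.isIn "machine learning" o = b2
    generalize PySem.Str.isIn "database" o = b3
    revert b0 b1 b2 b3
    decide
  by_cases h8 : s = "ai"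
  · subst h8
    rw [show PySem.Dict.getD pvCategoryBit "ai" (0 : Int) = 4 from rfl]
    generalize PySem.Str.isIn "javascript" o = b0
    generalize PySem.Str.isIn "python" o = b1
    generalize PySem.Str.isIn "machine learning" o = b2
    generalize PySem.Str.isIn "database" o = b3
    revert b0 b1 b2 b3
    decide
  by_cases h9 : s = "tensorflow"
  · subst h9
    rw [show PySem.Dict.getD pvCategoryBit "tensorflow" (0 : Int) = 4 from rfl]
    generalize PySem.Str.isIn "javascript" o = b0
    generalize PySem.Str.isIn "python" o = b1
    generalize PySem.Str.isIn "machine learning" o = b2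
    generalize PySem.Str.isIn "database" o = b3
    revert b0 b1 b2 b3
    decide
  by_cases h10 : s = "pytorch"
  · subst h10
    rw [show PySem.Dict.getD pvCategoryBit "pytorch" (0 : Int) = 4 from rfl]
    generalize PySem.Str.isIn "javascript" o = b0
    generalize PySem.Str.isIn "python" o = b1
    generalize PySem.Str.isIn "machine learning" o = b2
    generalize PySem.Str.isIn "database" o = b3
    revert b0 b1 b2 b3
    decide
  by_cases h11 : s = "sql"
  · subst h11
    rw [show PySem.Dict.getD pvCategoryBit "sql" (0 : Int) = 8 from rfl]
    generalize PySem.Str.isIn "javascript" o = b0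
    generalize PySem.Str.isIn "python" o = b1
    generalize PySem.Str.isIn "machine learning" o = b2
    generalize PySem.Str.isIn "database" o = b3
    revert b0 b1 b2 b3
    decide
  by_cases h12 : s = "mysql"
  · subst h12
    rw [show PySem.Dict.getD pvCategoryBit "mysql" (0 : Int) = 8 from rfl]
    generalize PySem.Str.isIn "javascript" o = b0
    generalize PySem.Str.isIn "python" o = b1
    generalize PySem.Str.isIn "machine learning" o = b2
    generalize PySem.Str.isIn "database" o = b3
    revert b0 b1 b2 b3
    decide
  by_cases h13 : s = "postgresql"
  · subst h13
    rw [show PySem.Dict.getD pvCategoryBit "postgresql" (0 : Int) = 8 from rfl]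
    generalize PySem.Str.isIn "javascript" o = b0
    generalize PySem.Str.isIn "python" o = b1
    generalize PySem.Str.isIn "machine learning" o = b2
    generalize PySem.Str.isIn "database" o = b3
    revert b0 b1 b2 b3
    decide
  by_cases h14 : s = "mongodb"
  · subst h14
    rw [show PySem.Dict.getD pvCategoryBit "mongodb" (0 : Int) = 8 from rfl]
    generalize PySem.Str.isIn "javascript" o = b0
    generalize PySem.Str.isIn "python" o = b1
    generalize PySem.Str.isIn "machine learning" o = b2
    generalize PySem.Str.isIn "database" o = b3
    revert b0 b1 b2 b3
    decide
  have hmk : pvCategoryBit = PySem.Dict.mk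
      [("js", 1), ("node", 1), ("react", 1), ("angular", 1),
       ("django", 2), ("flask", 2), ("fastapi", 2),
       ("ml", 4), ("ai", 4), ("tensorflow", 4), ("pytorch", 4),
       ("sql", 8), ("mysql", 8), ("postgresql", 8), ("mongodb", 8)] := rfl
  have hc : PySem.Dict.getD pvCategoryBit s 0 = 0 := by
    simp [PySem.Dict.getD, hmk, PySem.Dict.get?, Ne.symm h0, Ne.symm h1, Ne.symm h2, Ne.symm h3, Ne.symm h4, Ne.symm h5, Ne.symm h6, Ne.symm h7, Ne.symm h8, Ne.symm h9, Ne.symm h10, Ne.symm h11, Ne.symm h12, Ne.symm h13, Ne.symm h14]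
  rw [hc]
  have e0 : (["js", "node", "react", "angular"].contains s) = false := by simp [h0, h1, h2, h3]
  have e1 : (["django", "flask", "fastapi"].contains s) = false := by simp [h4, h5, h6]
  have e2 : (["ml", "ai", "tensorflow", "pytorch"].contains s) = false := by simp [h7, h8, h9, h10]
  have e3 : (["sql", "mysql", "postgresql", "mongodb"].contains s) = false := by simp [h11, h12, h13, h14]
  rw [e0, e1, e2, e3]
  generalize PySem.Str.isIn "javascript" o = b0
  generalize PySem.Str.isIn "python" o = b1
  generalize PySem.Str.isIn "machine learning" o = b2
  generalize PySem.Str.isIn "database" o = b3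
  revert b0 b1 b2 b3
  decide

-- ===== VERDICT (by name: the statement is the Claim_ definition above) =====
theorem skills_similar_py_spec : Claim_equal_skills_similar_py := by
  intro s1 s2 _
  unfold Spec_skills_similar_py skills_similar_py skills_similar_py_alt
  have hitems : pvSimilarSkills.items =
      [("javascript", ["js", "node", "react", "angular"]),
       ("python", ["django", "flask", "fastapi"]),
       ("machine learning", ["ml", "ai", "tensorflow", "pytorch"]),
       ("database", ["sql", "mysql", "postgresql", "mongodb"])] := rfl
  rw [hitems]
  simp only [pvSimilarLoop, Bool.if_true_left, Bool.decide_eq_true]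
  rw [← pvHalf s1 s2, ← pvHalf s2 s1]
  generalize (["js", "node", "react", "angular"].contains s1 && PySem.Str.isIn "javascript" s2) = a0
  generalize (["js", "node", "react", "angular"].contains s2 && PySem.Str.isIn "javascript" s1) = b0
  generalize (["django", "flask", "fastapi"].contains s1 && PySem.Str.isIn "python" s2) = a1
  generalize (["django", "flask", "fastapi"].contains s2 && PySem.Str.isIn "python" s1) = b1
  generalize (["ml", "ai", "tensorflow", "pytorch"].contains s1 && PySem.Str.isIn "machine learning" s2) = a2
  generalize (["ml", "ai", "tensorflow", "pytorch"].contains s2 && PySem.Str.isIn "machine learning" s1) = b2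
  generalize (["sql", "mysql", "postgresql", "mongodb"].contains s1 && PySem.Str.isIn "database" s2) = a3
  generalize (["sql", "mysql", "postgresql", "mongodb"].contains s2 && PySem.Str.isIn "database" s1) = b3
  revert a0 b0 a1 b1 a2 b2 a3 b3
  decide
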